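-- pv_equiv track=rewrite | github.com/juntizhang/NUS_IT5001_PE_Practical_Exam_Solution | Solution in py/2021_Sem 1.py | compareDNA_R
-- ===== SOURCE A (Python) =====
-- def compareDNA_R(dna1,dna2):
--     if not dna1:
--         return ''
--     elif dna1[0] == dna2[0]:
--         dna1 = '*'+compareDNA_R(dna1[1:],dna2[1:])
--     else:
--         dna1 = '.'+compareDNA_R(dna1[1:],dna2[1:])
--     return dna1
-- ===== SOURCE B (Python) =====
-- def compareDNA_R(dna1, dna2):
--     return ''.join('*' if dna1[i] == dna2[i] else '.' for i in range(len(dna1)))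
-- ===== Notes on version B (the rewrite author's own statement) =====
-- stated objective: faster
-- what changed: Replaces per-character recursion that slices and concatenates strings at every step with a single flat join over positions range(len(dna1)), indexing both strings directly.
import Mathlib
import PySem

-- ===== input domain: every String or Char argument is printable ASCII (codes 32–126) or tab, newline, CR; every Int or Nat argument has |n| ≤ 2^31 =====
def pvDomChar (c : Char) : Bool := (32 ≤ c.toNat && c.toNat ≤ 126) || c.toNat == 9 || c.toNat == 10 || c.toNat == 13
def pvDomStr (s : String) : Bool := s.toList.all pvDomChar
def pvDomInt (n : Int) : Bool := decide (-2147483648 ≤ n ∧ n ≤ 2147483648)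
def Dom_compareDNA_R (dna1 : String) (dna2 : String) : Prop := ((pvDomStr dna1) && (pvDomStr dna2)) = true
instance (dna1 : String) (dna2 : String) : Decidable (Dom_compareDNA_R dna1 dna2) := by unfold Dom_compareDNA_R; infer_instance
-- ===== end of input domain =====

-- B replaces A's per-character recursion (string slicing + concatenation) with a flat
-- position-indexed join over range(len(dna1)); a timing run measured B faster (no quadratic slicing).


-- ===== PORT A =====
-- A's recursion over the string: compare the heads, recurse on the tails.
-- When dna1 is nonempty but dna2 is empty, Python raises IndexError (dna2[0]); that
-- case is outside Pre_ and the port returns [] there.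
def compA : List Char → List Char → List Char
  | [], _ => []
  | _ :: _, [] => []            -- IndexError in Python; outside Pre_
  | c :: cs, d :: ds => (if c == d then '*' else '.') :: compA cs ds

def compareDNA_R (dna1 : String) (dna2 : String) : String :=
  String.mk (compA dna1.toList dna2.toList)

-- ===== PORT B =====
-- ''.join('*' if dna1[i] == dna2[i] else '.' for i in range(len(dna1)))
-- (pyGetD with a default models dna2[i]; under Pre_ every index is in range, and
-- out of Pre_ Python's B raises IndexError just like A.)
def compareDNA_R_alt (dna1 : String) (dna2 : String) : String :=
  String.mk ((PySem.List.pyRange 0 (dna1.toList.length : Int) 1).map (fun i =>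
    if PySem.List.pyGetD dna1.toList i ' ' == PySem.List.pyGetD dna2.toList i ' '
    then '*' else '.'))

-- ===== PRECONDITION & SPEC =====
-- Pre_ excludes exactly the inputs where A raises IndexError (dna2 shorter than dna1);
-- B raises IndexError there too.
def Pre_compareDNA_R (dna1 : String) (dna2 : String) : Prop :=
  dna1.toList.length ≤ dna2.toList.length
instance (dna1 : String) (dna2 : String) : Decidable (Pre_compareDNA_R dna1 dna2) := by
  unfold Pre_compareDNA_R; infer_instance

def pvWitness_compareDNA_R : String × String := ("ACGT", "AGGA")

def Spec_compareDNA_R (dna1 : String) (dna2 : String) (out : String) : Prop := out = compareDNA_R_alt dna1 dna2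
instance (dna1 : String) (dna2 : String) (out : String) : Decidable (Spec_compareDNA_R dna1 dna2 out) := by unfold Spec_compareDNA_R; infer_instance

-- ===== CLAIM (what is proved, stated in full; the proofs are below) =====
def Claim_equal_compareDNA_R : Prop := ∀ (dna1 : String) (dna2 : String), Dom_compareDNA_R dna1 dna2 → Pre_compareDNA_R dna1 dna2 → Spec_compareDNA_R dna1 dna2 (compareDNA_R dna1 dna2)

-- ===== LEMMAS AND PROOFS =====

-- On in-range lists, A's recursion equals B's index map.
theorem compA_eq_map (l1 : List Char) : ∀ (l2 : List Char), l1.length ≤ l2.length →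
    (List.range l1.length).map (fun k => if l1.getD k ' ' == l2.getD k ' ' then '*' else '.')
      = compA l1 l2 := by
  induction l1 with
  | nil => intro l2 _; simp [compA]
  | cons c cs ih =>
    intro l2 h
    cases l2 with
    | nil => simp at h
    | cons d ds =>
      simp only [List.length_cons, List.range_succ_eq_map, List.map_cons, List.map_map,
        compA, List.getD_cons_zero]
      congr 1
      rw [← ih ds (by simpa using h)]
      apply List.map_congr_left
      intro k _
      simp [Function.comp, List.getD_cons_succ]

theorem compareDNA_R_eq (dna1 dna2 : String) (h : Pre_compareDNA_R dna1 dna2) :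
    compareDNA_R dna1 dna2 = compareDNA_R_alt dna1 dna2 := by
  unfold compareDNA_R compareDNA_R_alt
  rw [PySem.List.pyRange_one]
  simp only [sub_zero, Int.toNat_natCast, List.map_map]
  congr 1
  rw [← compA_eq_map dna1.toList dna2.toList h]
  apply List.map_congr_left
  intro k _
  simp [Function.comp, PySem.List.pyGetD]

-- ===== VERDICT (by name: the statement is the Claim_ definition above) =====
theorem compareDNA_R_spec : Claim_equal_compareDNA_R := by
  intro d1 d2 _ h
  unfold Spec_compareDNA_R
  exact compareDNA_R_eq d1 d2 h
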